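-- pv_equiv track=rewrite | github.com/Jzgao04/Year9DesignCS-PythonPM | FootballScoring.py | count
-- ===== SOURCE A (Python) =====
-- def count(n):
--
--     # table[i] will store count of solutions for value i.
--     # Initialize all table values as 0.
--     table = [0 for i in range(n+1)]
--
--     # Base case (If given value is 0)
--     table[0] = 1
--
--     for i in range(2, n+1):
--         table[i] += table[i-2]
--     for i in range(3, n+1):
--         table[i] += table[i-3]
--     for i in range(6, n+1):
--         table[i] += table[i-6]
--     for i in range(7, n+1):
--         table[i] += table[i-7]
--     for i in range(8, n+1):
--         table[i] += table[i-8]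
--
--
--     return table[n]
-- ===== SOURCE B (Python) =====
-- def count(n):
--     # One pass, O(1) memory: keep only the last 8 values of each DP stage in
--     # 8-slot ring buffers instead of five full passes over an (n+1)-array.
--     h3 = [0] * 8
--     h6 = [0] * 8
--     h7 = [0] * 8
--     h8 = [0] * 8
--     r = 0
--     for i in range(n + 1):
--         t2 = 1 - i % 2
--         t3 = t2 + (h3[(i - 3) % 8] if i >= 3 else 0)
--         t6 = t3 + (h6[(i - 6) % 8] if i >= 6 else 0)
--         t7 = t6 + (h7[(i - 7) % 8] if i >= 7 else 0)
--         t8 = t7 + (h8[(i - 8) % 8] if i >= 8 else 0)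
--         h3[i % 8] = t3
--         h6[i % 8] = t6
--         h7[i % 8] = t7
--         h8[i % 8] = t8
--         r = t8
--     return r
-- ===== Notes on version B (the rewrite author's own statement) =====
-- stated objective: alternative
-- what changed: A makes five sequential full passes over a table of size n+1, one per coin; B makes a single pass keeping only the most recent values of each DP stage in four eight-slot ring buffers (constant memory, the parity stage collapsed to a closed form), never materialising the table.
import Mathlib
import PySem

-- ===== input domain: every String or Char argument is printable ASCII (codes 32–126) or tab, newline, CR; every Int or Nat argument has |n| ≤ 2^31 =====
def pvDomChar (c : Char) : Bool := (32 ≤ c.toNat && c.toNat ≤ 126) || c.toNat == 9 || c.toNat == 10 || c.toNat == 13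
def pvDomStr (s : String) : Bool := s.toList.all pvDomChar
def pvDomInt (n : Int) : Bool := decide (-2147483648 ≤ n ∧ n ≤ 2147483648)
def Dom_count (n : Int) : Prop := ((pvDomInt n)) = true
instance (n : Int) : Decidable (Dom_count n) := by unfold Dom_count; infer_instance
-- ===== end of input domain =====

-- B replaces A's five full passes over the whole table by ONE pass keeping only the
-- most recent values of each DP stage in eight-slot ring buffers (constant memory); same O(n) time.

-- ===== PORT A =====
-- one 'for i in range(c, n+1): table[i] += table[i-c]' loop (each of the five is this shape)
def aStage (c : Int) (n : Int) (t : List Int) : List Int :=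
  (PySem.List.pyRange c (n + 1) 1).foldl
    (fun t i => PySem.List.pySetD t i (PySem.List.pyGetD t i 0 + PySem.List.pyGetD t (i - c) 0)) t

def count (n : Int) : Int :=
  let table : List Int := (PySem.List.pyRange 0 (n + 1) 1).map (fun _ => (0 : Int))
  let table := PySem.List.pySetD table 0 1      -- table[0] = 1 (raises for n < 0: outside Pre_)
  let table := aStage 2 n table
  let table := aStage 3 n table
  let table := aStage 6 n table
  let table := aStage 7 n table
  let table := aStage 8 n table
  PySem.List.pyGetD table n 0

-- ===== PORT B =====
-- state: (h3, h6, h7, h8, r) — the four 8-slot ring buffers and the last computed value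
def bStep (st : List Int × List Int × List Int × List Int × Int) (i : Int) :
    List Int × List Int × List Int × List Int × Int :=
  let h3 := st.1
  let h6 := st.2.1
  let h7 := st.2.2.1
  let h8 := st.2.2.2.1
  let t2 : Int := 1 - PySem.Int.mod i 2
  let t3 := t2 + (if 3 ≤ i then PySem.List.pyGetD h3 (PySem.Int.mod (i - 3) 8) 0 else 0)
  let t6 := t3 + (if 6 ≤ i then PySem.List.pyGetD h6 (PySem.Int.mod (i - 6) 8) 0 else 0)
  let t7 := t6 + (if 7 ≤ i then PySem.List.pyGetD h7 (PySem.Int.mod (i - 7) 8) 0 else 0)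
  let t8 := t7 + (if 8 ≤ i then PySem.List.pyGetD h8 (PySem.Int.mod (i - 8) 8) 0 else 0)
  (PySem.List.pySetD h3 (PySem.Int.mod i 8) t3,
   PySem.List.pySetD h6 (PySem.Int.mod i 8) t6,
   PySem.List.pySetD h7 (PySem.Int.mod i 8) t7,
   PySem.List.pySetD h8 (PySem.Int.mod i 8) t8, t8)

def count_alt (n : Int) : Int :=
  ((PySem.List.pyRange 0 (n + 1) 1).foldl bStep
    (List.replicate 8 0, List.replicate 8 0, List.replicate 8 0, List.replicate 8 0, 0)).2.2.2.2

-- ===== PRECONDITION & SPEC =====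
-- Pre_ excludes exactly the negative inputs, on which Python A raises IndexError (the base-case write into an empty table).
def Pre_count (n : Int) : Prop := 0 ≤ n
instance (n : Int) : Decidable (Pre_count n) := by unfold Pre_count; infer_instance
def pvWitness_count : Int := 9

def Spec_count (n : Int) (out : Int) : Prop := out = count_alt n
instance (n : Int) (out : Int) : Decidable (Spec_count n out) := by unfold Spec_count; infer_instance

-- ===== CLAIM (what is proved, stated in full; the proofs are below) =====
def Claim_equal_count : Prop := ∀ (n : Int), Dom_count n → Pre_count n → Spec_count n (count n)

-- ===== LEMMAS AND PROOFS =====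

-- the mathematical shape shared by both programs: stage c of the coin DP on top of g
def e0 (i : Nat) : Int := if i = 0 then 1 else 0

def chain (c : Nat) (g : Nat → Int) (i : Nat) : Int :=
  g i + (if h : 0 < c ∧ c ≤ i then chain c g (i - c) else 0)
termination_by i
decreasing_by omega

def f2 : Nat → Int := chain 2 e0
def f3 : Nat → Int := chain 3 f2
def f6 : Nat → Int := chain 6 f3
def f7 : Nat → Int := chain 7 f6
def f8 : Nat → Int := chain 8 f7

lemma chain_lt {c : Nat} (g : Nat → Int) {i : Nat} (h : i < c) : chain c g i = g i := by
  rw [chain]; rw [dif_neg (by omega)]; ring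

lemma chain_ge {c : Nat} (g : Nat → Int) {i : Nat} (hc : 0 < c) (h : c ≤ i) :
    chain c g i = g i + chain c g (i - c) := by
  rw [chain]; rw [dif_pos ⟨hc, h⟩]

lemma getD_set_self (t : List Int) (i : Nat) (v : Int) (h : i < t.length) :
    (t.set i v).getD i 0 = v := by
  simp [List.getD_eq_getElem?_getD, h]

lemma getD_set_ne (t : List Int) (i j : Nat) (v : Int) (h : j ≠ i) :
    (t.set i v).getD j 0 = t.getD j 0 := by
  simp [List.getD_eq_getElem?_getD, Ne.symm h]

lemma stage_aux (c : Nat) (hc : 0 < c) (g : Nat → Int) (L : Nat) :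
    ∀ (fuel : Nat) (s : Nat) (t : List Int), L - s ≤ fuel → c ≤ s → t.length = L →
      (∀ j, j < L → t.getD j 0 = if j < s then chain c g j else g j) →
      (((PySem.List.pyRange (s : Int) (L : Int) 1).foldl
        (fun t i => PySem.List.pySetD t i (PySem.List.pyGetD t i 0 + PySem.List.pyGetD t (i - c) 0)) t).length = L ∧
       ∀ j, j < L →
        ((PySem.List.pyRange (s : Int) (L : Int) 1).foldl
          (fun t i => PySem.List.pySetD t i (PySem.List.pyGetD t i 0 + PySem.List.pyGetD t (i - c) 0)) t).getD j 0
          = chain c g j) := by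
  intro fuel
  induction fuel with
  | zero =>
    intro s t hfuel hcs hlen ht
    have hLs : L ≤ s := by omega
    rw [PySem.List.pyRange_one_eq_nil (by exact_mod_cast hLs)]
    simp only [List.foldl_nil]
    refine ⟨hlen, fun j hj => ?_⟩
    rw [ht j hj, if_pos (by omega)]
  | succ fuel ih =>
    intro s t hfuel hcs hlen ht
    by_cases hLs : L ≤ s
    · rw [PySem.List.pyRange_one_eq_nil (by exact_mod_cast hLs)]
      simp only [List.foldl_nil]
      refine ⟨hlen, fun j hj => ?_⟩
      rw [ht j hj, if_pos (by omega)]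
    · have hsL : s < L := by omega
      rw [PySem.List.pyRange_one_cons (by exact_mod_cast hsL)]
      rw [List.foldl_cons]
      have hcast : (s : Int) - (c : Int) = ((s - c : Nat) : Int) := by omega
      have hstep :
          PySem.List.pySetD t (s : Int)
            (PySem.List.pyGetD t (s : Int) 0 + PySem.List.pyGetD t ((s : Int) - (c : Int)) 0)
          = t.set s (t.getD s 0 + t.getD (s - c) 0) := by
        rw [hcast]
        rw [PySem.List.pyGetD_natCast, PySem.List.pyGetD_natCast, PySem.List.pySetD_natCast]
      rw [hstep]
      have h1 : ((s : Int) + 1) = ((s + 1 : Nat) : Int) := by omega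
      rw [h1]
      apply ih (s + 1) _ (by omega) (by omega)
      · simp [hlen]
      · intro j hj
        by_cases hjs : j = s
        · have hv : t.getD s 0 + t.getD (s - c) 0 = chain c g s := by
            rw [ht s hsL, if_neg (by omega)]
            rw [ht (s - c) (by omega), if_pos (by omega)]
            rw [chain_ge g hc hcs]
          subst hjs
          rw [getD_set_self _ _ _ (by omega), hv, if_pos (by omega)]
        · rw [getD_set_ne _ _ _ _ hjs, ht j hj]
          by_cases h2 : j < s
          · rw [if_pos h2, if_pos (by omega)]
          · rw [if_neg h2, if_neg (by omega)]

lemma aStage_spec (c : Nat) (hc : 0 < c) (g : Nat → Int) (n : Int) (L : Nat)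
    (hL : n + 1 = (L : Int)) (t : List Int) (hlen : t.length = L)
    (ht : ∀ j, j < L → t.getD j 0 = g j) :
    (aStage (c : Int) n t).length = L ∧
      ∀ j, j < L → (aStage (c : Int) n t).getD j 0 = chain c g j := by
  have := stage_aux c hc g L L c t (by omega) (le_refl c) hlen
    (fun j hj => by
      rw [ht j hj]
      by_cases h : j < c
      · rw [if_pos h, chain_lt g h]
      · rw [if_neg h])
  unfold aStage
  rw [hL]
  exact this

lemma pyGetD_toNat (t : List Int) (n : Int) (hn : 0 ≤ n) :
    PySem.List.pyGetD t n 0 = t.getD n.toNat 0 := by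
  have h : n = ((n.toNat : Nat) : Int) := by omega
  rw [show PySem.List.pyGetD t n 0 = PySem.List.pyGetD t ((n.toNat : Nat) : Int) 0 from by
    rw [← h], PySem.List.pyGetD_natCast]

lemma getD_map_const (l : List Int) (j : Nat) : (l.map (fun _ => (0 : Int))).getD j 0 = 0 := by
  induction l generalizing j with
  | nil => simp [List.getD]
  | cons a l ih => cases j with
    | zero => simp [List.getD]
    | succ j => simpa [List.getD] using ih j

lemma count_eq_f8 (n : Int) (hn : 0 ≤ n) : count n = f8 n.toNat := by
  set L := n.toNat + 1 with hLdef
  have hL : n + 1 = (L : Int) := by omega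
  have hc2 : ((2 : Nat) : Int) = (2 : Int) := by norm_num
  have hc3 : ((3 : Nat) : Int) = (3 : Int) := by norm_num
  have hc6 : ((6 : Nat) : Int) = (6 : Int) := by norm_num
  have hc7 : ((7 : Nat) : Int) = (7 : Int) := by norm_num
  have hc8 : ((8 : Nat) : Int) = (8 : Int) := by norm_num
  unfold count
  set t0 : List Int := (PySem.List.pyRange 0 (n + 1) 1).map (fun _ => (0 : Int)) with ht0
  have hlen0 : t0.length = L := by
    simp [ht0, PySem.List.length_pyRange_one]; omega
  set t1 := PySem.List.pySetD t0 0 1 with ht1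
  have ht1' : t1 = t0.set 0 1 := by
    rw [ht1, PySem.List.pySetD_of_nonneg t0 1 (by norm_num)]
    norm_num
  have hlen1 : t1.length = L := by rw [ht1']; simpa using hlen0
  have hval1 : ∀ j, j < L → t1.getD j 0 = e0 j := by
    intro j hj
    rw [ht1']
    by_cases hj0 : j = 0
    · subst hj0
      rw [getD_set_self _ _ _ (by omega)]
      simp [e0]
    · rw [getD_set_ne _ _ _ _ hj0, ht0, getD_map_const]
      simp [e0, hj0]
  have s2 := aStage_spec 2 (by norm_num) e0 n L hL t1 hlen1 hval1
  rw [hc2] at s2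
  have s3 := aStage_spec 3 (by norm_num) f2 n L hL _ s2.1 s2.2
  rw [hc3] at s3
  have s6 := aStage_spec 6 (by norm_num) f3 n L hL _ s3.1 s3.2
  rw [hc6] at s6
  have s7 := aStage_spec 7 (by norm_num) f6 n L hL _ s6.1 s6.2
  rw [hc7] at s7
  have s8 := aStage_spec 8 (by norm_num) f7 n L hL _ s7.1 s7.2
  rw [hc8] at s8
  rw [pyGetD_toNat _ n hn]
  exact s8.2 n.toNat (by omega)

lemma f2_closed (s : Nat) : f2 s = 1 - ((s % 2 : Nat) : Int) := by
  induction s using Nat.strong_induction_on with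
  | _ s ih =>
    by_cases h : 2 ≤ s
    · show chain 2 e0 s = _
      rw [chain_ge e0 (by norm_num) h]
      have hih := ih (s - 2) (by omega)
      unfold f2 at hih
      rw [hih]
      have he : e0 s = 0 := by simp [e0]; omega
      rw [he]
      have : (s - 2) % 2 = s % 2 := by omega
      rw [this]; ring
    · show chain 2 e0 s = _
      rw [chain_lt e0 (by omega)]
      interval_cases s <;> simp [e0]

def Pinv (s : Nat) (st : List Int × List Int × List Int × List Int × Int) : Prop :=
  st.1.length = 8 ∧ st.2.1.length = 8 ∧ st.2.2.1.length = 8 ∧ st.2.2.2.1.length = 8 ∧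
  (∀ k, k < s → s ≤ k + 8 →
    st.1.getD (k % 8) 0 = f3 k ∧ st.2.1.getD (k % 8) 0 = f6 k ∧
    st.2.2.1.getD (k % 8) 0 = f7 k ∧ st.2.2.2.1.getD (k % 8) 0 = f8 k) ∧
  st.2.2.2.2 = if s = 0 then 0 else f8 (s - 1)

lemma mod_natCast8 (k : Nat) : PySem.Int.mod ((k : Nat) : Int) 8 = ((k % 8 : Nat) : Int) := by
  exact_mod_cast PySem.Int.mod_natCast k 8

lemma bStep_inv (s : Nat) (st : List Int × List Int × List Int × List Int × Int)
    (h : Pinv s st) : Pinv (s + 1) (bStep st (s : Int)) := by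
  obtain ⟨H3, H6, H7, H8, r⟩ := st
  obtain ⟨hl3, hl6, hl7, hl8, hinv, hr⟩ := h
  simp only at hl3 hl6 hl7 hl8 hr
  -- the four stage values computed by the loop body
  have ht2 : (1 - PySem.Int.mod ((s : Nat) : Int) 2) = f2 s := by
    have : PySem.Int.mod ((s : Nat) : Int) 2 = ((s % 2 : Nat) : Int) := by
      exact_mod_cast PySem.Int.mod_natCast s 2
    rw [this, f2_closed]
  have stage : ∀ (c : Nat) (H : List Int) (g : Nat → Int), 0 < c → c ≤ 8 → H.length = 8 →
      (∀ k, k < s → s ≤ k + 8 → H.getD (k % 8) 0 = chain c g k) →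
      g s + (if (c : Int) ≤ (s : Int) then PySem.List.pyGetD H (PySem.Int.mod ((s : Int) - (c : Int)) 8) 0 else 0)
        = chain c g s := by
    intro c H g hc hc8 hlen hH
    by_cases hcs : c ≤ s
    · rw [if_pos (by exact_mod_cast hcs)]
      have hcast : ((s : Int) - (c : Int)) = (((s - c : Nat) : Nat) : Int) := by omega
      rw [hcast, mod_natCast8, PySem.List.pyGetD_natCast]
      rw [hH (s - c) (by omega) (by omega)]
      rw [chain_ge g hc hcs]
    · rw [if_neg (by exact_mod_cast hcs), chain_lt g (by omega)]
      ring
  have e3 : 1 - PySem.Int.mod ((s : Nat) : Int) 2 +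
      (if (3:Int) ≤ ((s : Nat) : Int) then PySem.List.pyGetD H3 (PySem.Int.mod (((s : Nat) : Int) - 3) 8) 0 else 0)
      = f3 s := by
    rw [ht2]
    have h := stage 3 H3 f2 (by norm_num) (by norm_num) hl3
      (fun k hk hk8 => (hinv k hk hk8).1)
    norm_num at h ⊢
    exact h
  have e6 : f3 s +
      (if (6:Int) ≤ ((s : Nat) : Int) then PySem.List.pyGetD H6 (PySem.Int.mod (((s : Nat) : Int) - 6) 8) 0 else 0)
      = f6 s := by
    have h := stage 6 H6 f3 (by norm_num) (by norm_num) hl6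
      (fun k hk hk8 => (hinv k hk hk8).2.1)
    norm_num at h ⊢
    exact h
  have e7 : f6 s +
      (if (7:Int) ≤ ((s : Nat) : Int) then PySem.List.pyGetD H7 (PySem.Int.mod (((s : Nat) : Int) - 7) 8) 0 else 0)
      = f7 s := by
    have h := stage 7 H7 f6 (by norm_num) (by norm_num) hl7
      (fun k hk hk8 => (hinv k hk hk8).2.2.1)
    norm_num at h ⊢
    exact h
  have e8 : f7 s +
      (if (8:Int) ≤ ((s : Nat) : Int) then PySem.List.pyGetD H8 (PySem.Int.mod (((s : Nat) : Int) - 8) 8) 0 else 0)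
      = f8 s := by
    have h := stage 8 H8 f7 (by norm_num) (by norm_num) hl8
      (fun k hk hk8 => (hinv k hk hk8).2.2.2)
    norm_num at h ⊢
    exact h
  have hb : bStep (H3, H6, H7, H8, r) ((s : Nat) : Int) =
      (H3.set (s % 8) (f3 s), H6.set (s % 8) (f6 s), H7.set (s % 8) (f7 s),
       H8.set (s % 8) (f8 s), f8 s) := by
    simp only [bStep]
    rw [e3, e6, e7, e8, mod_natCast8, PySem.List.pySetD_natCast,
      PySem.List.pySetD_natCast, PySem.List.pySetD_natCast, PySem.List.pySetD_natCast]
  rw [hb]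
  refine ⟨by simpa using hl3, by simpa using hl6, by simpa using hl7, by simpa using hl8,
    ?_, by simp⟩
  intro k hk hk8
  by_cases hks : k = s
  · subst hks
    exact ⟨getD_set_self _ _ _ (by rw [hl3]; omega), getD_set_self _ _ _ (by rw [hl6]; omega),
      getD_set_self _ _ _ (by rw [hl7]; omega), getD_set_self _ _ _ (by rw [hl8]; omega)⟩
  · have hne : k % 8 ≠ s % 8 := by omega
    have h := hinv k (by omega) (by omega)
    exact ⟨by rw [getD_set_ne _ _ _ _ hne]; exact h.1,
      by rw [getD_set_ne _ _ _ _ hne]; exact h.2.1,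
      by rw [getD_set_ne _ _ _ _ hne]; exact h.2.2.1,
      by rw [getD_set_ne _ _ _ _ hne]; exact h.2.2.2⟩


lemma bFold (L : Nat) : ∀ (fuel s : Nat) (st : List Int × List Int × List Int × List Int × Int),
    L - s ≤ fuel → s ≤ L → Pinv s st →
    Pinv L ((PySem.List.pyRange (s : Int) (L : Int) 1).foldl bStep st) := by
  intro fuel
  induction fuel with
  | zero =>
    intro s st hfuel hsL hst
    have : s = L := by omega
    subst this
    rw [PySem.List.pyRange_one_eq_nil (le_refl _)]
    simpa using hst
  | succ fuel ih =>
    intro s st hfuel hsL hst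
    by_cases heq : s = L
    · subst heq
      rw [PySem.List.pyRange_one_eq_nil (le_refl _)]
      simpa using hst
    · have hlt : s < L := by omega
      rw [PySem.List.pyRange_one_cons (by exact_mod_cast hlt), List.foldl_cons]
      have h1 : ((s : Int) + 1) = ((s + 1 : Nat) : Int) := by omega
      rw [h1]
      exact ih (s + 1) _ (by omega) (by omega) (bStep_inv s st hst)

lemma count_alt_eq_f8 (n : Int) (hn : 0 ≤ n) : count_alt n = f8 n.toNat := by
  unfold count_alt
  have hL : n + 1 = ((n.toNat + 1 : Nat) : Int) := by omega
  rw [hL]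
  have hinit : Pinv 0 (List.replicate 8 0, List.replicate 8 0, List.replicate 8 0,
      List.replicate 8 0, (0 : Int)) := by
    refine ⟨by simp, by simp, by simp, by simp, fun k hk _ => by omega, by simp⟩
  have h := bFold (n.toNat + 1) (n.toNat + 1) 0 _ (by omega) (by omega) hinit
  rw [show ((0 : Nat) : Int) = (0 : Int) from by norm_num] at h
  have hr := h.2.2.2.2.2
  rw [hr, if_neg (by omega)]
  congr 1

-- ===== VERDICT (by name: the statement is the Claim_ definition above) =====
theorem count_spec : Claim_equal_count := by
  intro n _ hpre
  unfold Spec_count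
  unfold Pre_count at hpre
  rw [count_eq_f8 n hpre, count_alt_eq_f8 n hpre]
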